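-- pv_equiv track=rewrite | github.com/nabi1103/bsc-emo | ensemble/ensemble.py | get_top_value
-- ===== SOURCE A (Python) =====
-- def get_top_value(values, limit):
--     temp = []
--     for i in range(len(values)):
--         temp.append(values[i])
--     temp.sort(reverse=True)
--     top = temp[:limit]
--     for i in range(len(values)):
--         if values[i] not in top:
--             values[i] = 0
--     return values
-- ===== SOURCE B (Python) =====
-- def get_top_value(values, limit):
--     # Derive a single scalar threshold from the limit-th largest value instead of
--     # repeatedly scanning a list of top values.  Mutates `values` in place like A.
--     cutoff = sorted(values, reverse=True)[:limit]
--     threshold = cutoff[-1] if cutoff else None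
--     for i in range(len(values)):
--         if threshold is None or values[i] < threshold:
--             values[i] = 0
--     return values
-- ===== Notes on version B (the rewrite author's own statement) =====
-- stated objective: faster
-- what changed: B replaces A's per-element membership scan of the top-`limit` list with a single scalar threshold (the minimum of the sorted prefix), so the marking pass does one comparison per element instead of scanning a list.
import Mathlib
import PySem

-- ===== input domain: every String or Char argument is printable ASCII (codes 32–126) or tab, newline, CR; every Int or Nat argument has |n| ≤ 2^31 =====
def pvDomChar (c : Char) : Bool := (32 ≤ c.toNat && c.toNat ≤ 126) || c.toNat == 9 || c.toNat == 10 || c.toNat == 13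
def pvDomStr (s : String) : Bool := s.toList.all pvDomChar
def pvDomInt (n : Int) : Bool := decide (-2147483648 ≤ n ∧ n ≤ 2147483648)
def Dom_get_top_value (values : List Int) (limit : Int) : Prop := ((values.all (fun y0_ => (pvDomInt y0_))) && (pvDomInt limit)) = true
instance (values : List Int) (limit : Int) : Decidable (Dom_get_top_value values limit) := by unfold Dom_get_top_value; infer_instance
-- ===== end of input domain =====

-- B replaces A's per-element membership scan of the top-`limit` list with one scalar
-- threshold comparison (faster marking pass).  A mutates `values` in place and B does the
-- same in Python; the equivalence proved here is about the returned list of values.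

-- ===== PORT A =====
def get_top_value (values : List Int) (limit : Int) : List Int :=
  -- temp = []; for i in range(len(values)): temp.append(values[i])
  let temp : List Int := values.foldl (fun acc v => acc ++ [v]) []
  -- temp.sort(reverse=True)
  let temp := PySem.List.sorted temp (fun x => x) true
  -- top = temp[:limit]
  let top := PySem.List.slice temp none (some limit)
  -- for i in range(len(values)): if values[i] not in top: values[i] = 0
  values.map (fun v => if v ∈ top then v else 0)

-- ===== PORT B =====
def get_top_value_alt (values : List Int) (limit : Int) : List Int :=
  -- cutoff = sorted(values, reverse=True)[:limit]
  let cutoff := PySem.List.slice (PySem.List.sorted values (fun x => x) true) none (some limit)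
  -- threshold = cutoff[-1] if cutoff else None; zero out values[i] below the threshold
  match cutoff.getLast? with
  | none => values.map (fun _ => 0)
  | some threshold => values.map (fun v => if v < threshold then 0 else v)

-- ===== PRECONDITION & SPEC =====
def Spec_get_top_value (values : List Int) (limit : Int) (out : List Int) : Prop := out = get_top_value_alt values limit
instance (values : List Int) (limit : Int) (out : List Int) : Decidable (Spec_get_top_value values limit out) := by unfold Spec_get_top_value; infer_instance

-- ===== CLAIM (what is proved, stated in full; the proofs are below) =====
def Claim_equal_get_top_value : Prop := ∀ (values : List Int) (limit : Int), Dom_get_top_value values limit → Spec_get_top_value values limit (get_top_value values limit)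

-- ===== LEMMAS AND PROOFS =====

-- xs[:b] is a prefix of xs.
lemma pv_slice_to_is_take {α : Type} (xs : List α) (b : Int) :
    ∃ m, PySem.List.slice xs none (some b) = xs.take m := by
  refine ⟨PySem.List.clampIdx xs.length b, ?_⟩
  simp [PySem.List.slice]

-- In a descending list, the last element of any nonempty prefix bounds the prefix from
-- below and the rest of the list from above; hence membership in the prefix is exactly
-- "≥ that last element", for elements of the list.
lemma pv_last_le_of_pairwise (t : List Int) (h : t.Pairwise (fun a b => b ≤ a))
    (hne : t ≠ []) : ∀ v ∈ t, t.getLast hne ≤ v := by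
  induction t with
  | nil => simp
  | cons x t ih =>
    intro v hv
    rcases List.pairwise_cons.mp h with ⟨hx, ht⟩
    cases t with
    | nil => simp at hv; simp [hv, List.getLast]
    | cons y t' =>
      rw [List.getLast_cons (by simp)]
      rcases List.mem_cons.mp hv with rfl | hv'
      · exact hx _ (List.getLast_mem (by simp))
      · exact ih ht (by simp) v hv'

lemma pv_mem_prefix_iff (t r : List Int)
    (h : (t ++ r).Pairwise (fun a b => b ≤ a)) (hne : t ≠ [])
    (v : Int) (hv : v ∈ t ++ r) :
    (v ∈ t ↔ t.getLast hne ≤ v) := by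
  rcases List.pairwise_append.mp h with ⟨ht, hr, hcross⟩
  constructor
  · exact fun hvt => pv_last_le_of_pairwise t ht hne v hvt
  · intro hle
    rcases List.mem_append.mp hv with hvt | hvr
    · exact hvt
    · have hup : v ≤ t.getLast hne := hcross _ (List.getLast_mem hne) _ hvr
      have : v = t.getLast hne := le_antisymm hup hle
      rw [this]; exact List.getLast_mem hne

-- ===== VERDICT (by name: the statement is the Claim_ definition above) =====
theorem get_top_value_spec : Claim_equal_get_top_value := by
  intro values limit _
  unfold Spec_get_top_value get_top_value get_top_value_alt
  simp only [PySem.List.foldl_append_singleton, List.nil_append]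
  set s := PySem.List.sorted values (fun x => x) true with hs
  obtain ⟨m, hm⟩ := pv_slice_to_is_take s limit
  rw [hm]
  have hpw : s.Pairwise (fun a b => b ≤ a) := by
    simpa using PySem.List.sorted_pairwise_rev values (fun x => x)
  have hsplit : s = s.take m ++ s.drop m := (List.take_append_drop m s).symm
  cases hlast : (s.take m).getLast? with
  | none =>
    have : s.take m = [] := List.getLast?_eq_none_iff.mp hlast
    simp [this]
  | some threshold =>
    have hne : s.take m ≠ [] := by
      intro h; rw [h] at hlast; simp at hlast
    have hthr : (s.take m).getLast hne = threshold := by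
      have := List.getLast?_eq_some_getLast (l := s.take m) hne
      rw [hlast] at this; exact (Option.some_inj.mp this).symm
    apply List.map_congr_left
    intro v hv
    have hvs : v ∈ s := by
      rw [hs, PySem.List.mem_sorted]; exact hv
    have hiff := pv_mem_prefix_iff (s.take m) (s.drop m)
      (by rw [← hsplit]; exact hpw) hne v (by rw [← hsplit]; exact hvs)
    rw [hthr] at hiff
    by_cases hvm : v ∈ s.take m
    · rw [if_pos hvm, if_neg (by exact not_lt.mpr (hiff.mp hvm))]
    · rw [if_neg hvm, if_pos (by by_contra h; exact hvm (hiff.mpr (not_lt.mp h)))]
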